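-- pv_equiv track=rewrite | github.com/alishalabi/practice_2024 | coding_problems/first_letter_before_second.py | first_before_second
-- ===== SOURCE A (Python) =====
-- def first_before_second(string, letter1, letter2):
--     second_has_occured = False
--     for letter in string:
--         if second_has_occured == True and letter == letter1:
--             return False
--         elif letter == letter2:
--             second_has_occured = True
--
--     return True
-- ===== SOURCE B (Python) =====
-- def first_before_second(string, letter1, letter2):
--     i = next((i for i, c in enumerate(string) if c == letter2), None)
--     if i is None:
--         return True
--     return not any(c == letter1 for c in string[i+1:])
-- ===== Notes on version B (the rewrite author's own statement) =====
-- stated objective: simpler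
-- what changed: Replaces the boolean-flag single pass with a find-the-pivot decomposition: locate the first character equal to letter2, then check the suffix after it contains no character equal to letter1.
import Mathlib
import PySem

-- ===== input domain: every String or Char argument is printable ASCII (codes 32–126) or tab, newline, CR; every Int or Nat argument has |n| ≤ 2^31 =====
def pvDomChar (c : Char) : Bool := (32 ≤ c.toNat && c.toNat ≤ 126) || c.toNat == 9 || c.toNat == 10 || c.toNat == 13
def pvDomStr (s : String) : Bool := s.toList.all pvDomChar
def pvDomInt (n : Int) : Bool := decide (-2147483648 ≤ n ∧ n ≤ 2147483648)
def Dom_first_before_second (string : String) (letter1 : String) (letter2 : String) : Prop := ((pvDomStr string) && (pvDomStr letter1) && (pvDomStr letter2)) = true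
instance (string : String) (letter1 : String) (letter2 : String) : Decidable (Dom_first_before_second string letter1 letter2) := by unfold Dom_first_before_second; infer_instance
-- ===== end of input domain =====

-- B replaces the boolean-flag single pass with a find-the-pivot-then-scan-the-suffix decomposition (simpler); same O(n) cost.
-- ===== PORT A =====
def firstBeforeSecondGo (letter1 : String) (letter2 : String) : List Char → Bool → Bool
  | [], _ => true
  | c :: rest, occ =>
    if occ = true && [c] == letter1.toList then false
    else if [c] == letter2.toList then firstBeforeSecondGo letter1 letter2 rest true
    else firstBeforeSecondGo letter1 letter2 rest occ

def first_before_second (string : String) (letter1 : String) (letter2 : String) : Bool :=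
  firstBeforeSecondGo letter1 letter2 string.toList false

-- ===== PORT B =====
def first_before_second_alt (string : String) (letter1 : String) (letter2 : String) : Bool :=
  match string.toList.findIdx? (fun c => [c] == letter2.toList) with
  | none => true
  | some i => !((string.toList.drop (i + 1)).any (fun c => [c] == letter1.toList))

-- ===== PRECONDITION & SPEC =====
def Spec_first_before_second (string : String) (letter1 : String) (letter2 : String) (out : Bool) : Prop := out = first_before_second_alt string letter1 letter2
instance (string : String) (letter1 : String) (letter2 : String) (out : Bool) : Decidable (Spec_first_before_second string letter1 letter2 out) := by unfold Spec_first_before_second; infer_instance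

-- ===== CLAIM (what is proved, stated in full; the proofs are below) =====
def Claim_equal_first_before_second : Prop := ∀ (string : String) (letter1 : String) (letter2 : String), Dom_first_before_second string letter1 letter2 → Spec_first_before_second string letter1 letter2 (first_before_second string letter1 letter2)

-- ===== LEMMAS AND PROOFS =====


lemma goA_true (letter1 letter2 : String) (l : List Char) :
    firstBeforeSecondGo letter1 letter2 l true = !(l.any (fun c => [c] == letter1.toList)) := by
  induction l with
  | nil => simp [firstBeforeSecondGo]
  | cons c rest ih =>
    simp only [firstBeforeSecondGo, List.any_cons]
    by_cases h1 : [c] == letter1.toList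
    · simp [h1]
    · by_cases h2 : [c] == letter2.toList <;> simp [h1, h2, ih]

lemma goA_false (letter1 letter2 : String) (l : List Char) :
    firstBeforeSecondGo letter1 letter2 l false =
      match l.findIdx? (fun c => [c] == letter2.toList) with
      | none => true
      | some i => !((l.drop (i + 1)).any (fun c => [c] == letter1.toList)) := by
  induction l with
  | nil => rfl
  | cons c rest ih =>
    by_cases h2 : [c] == letter2.toList
    · simp [firstBeforeSecondGo, h2, goA_true, List.findIdx?_cons]
    · rw [firstBeforeSecondGo, if_neg (by simp), if_neg (by simpa using h2), ih,
        List.findIdx?_cons]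
      simp only [h2]
      cases hf : rest.findIdx? (fun c => [c] == letter2.toList) with
      | none => simp
      | some i => simp [List.drop_succ_cons]

-- ===== VERDICT (by name: the statement is the Claim_ definition above) =====
theorem first_before_second_spec : Claim_equal_first_before_second := by
  intro string letter1 letter2 _
  unfold Spec_first_before_second first_before_second first_before_second_alt
  exact goA_false letter1 letter2 string.toList
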